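-- pv_equiv track=rewrite | github.com/P0ntiff/algs-sandbox | algs-sandbox-python/supporters_attendance.py | teams_with_full_attendance
-- ===== SOURCE A (Python) =====
-- def teams_with_full_attendance(teams_to_supporters, folks_available):
--     visited = {}
--     output = []
--     def visit(team):
--         full_attendance = True
--         if len(teams_to_supporters[team]) == 0:
--             visited[team] = True
--             return
--         for member in teams_to_supporters[team]:
--             if member in visited:
--                 # checked this team already, see if they had full attendance
--                 full_attendance &= visited[member]
--             else:
--                 if member in teams_to_supporters:
--                     # must be a team we haven't seen, visit
--                     visit(member)
--                     full_attendance &= visited[member]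
--                 else:
--                     # must be a supporter, just check if they're available
--                     full_attendance &= member in folks_available
--         visited[team] = full_attendance
--     for team in teams_to_supporters:
--         visit(team)
--         if visited[team]:
--             output.append(team)
--     return output
-- ===== SOURCE B (Python) =====
-- def teams_with_full_attendance(teams_to_supporters, folks_available):
--     def attends(member):
--         if member in teams_to_supporters:
--             return all(attends(m) for m in teams_to_supporters[member])
--         return member in folks_available
--     return [team for team in teams_to_supporters if attends(team)]
-- ===== Notes on version B (the rewrite author's own statement) =====
-- stated objective: simpler
-- what changed: Replaced the memoized DFS that threads a mutable visited dict and an output list through a recursive visit procedure by a short pure recursive predicate attends (a member attends iff it is an available supporter, or a team all of whose members attend) plus a list comprehension over the teams; B keeps no visited table and performs no mutation.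
import Mathlib
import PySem

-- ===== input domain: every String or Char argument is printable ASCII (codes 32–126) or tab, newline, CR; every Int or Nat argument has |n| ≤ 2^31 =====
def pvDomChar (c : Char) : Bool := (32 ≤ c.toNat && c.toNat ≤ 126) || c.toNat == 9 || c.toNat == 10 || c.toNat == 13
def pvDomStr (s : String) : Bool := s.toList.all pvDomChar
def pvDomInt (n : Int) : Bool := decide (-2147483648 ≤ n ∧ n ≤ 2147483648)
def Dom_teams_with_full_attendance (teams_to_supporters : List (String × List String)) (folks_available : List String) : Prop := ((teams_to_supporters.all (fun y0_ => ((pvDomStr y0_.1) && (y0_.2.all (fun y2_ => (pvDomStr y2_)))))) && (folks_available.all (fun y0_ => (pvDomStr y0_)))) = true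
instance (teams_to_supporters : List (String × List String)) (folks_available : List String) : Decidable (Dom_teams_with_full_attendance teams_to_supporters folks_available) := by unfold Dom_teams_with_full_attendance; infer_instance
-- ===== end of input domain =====

-- B replaces A's memoized DFS (mutable visited dict + output list) by a pure recursive
-- 'attends' predicate and a comprehension over the teams: simpler, no mutation, no memo table.


-- ===== PORT A =====
-- A's recursive 'visit': mutates the visited dict; fuel (bounded by the recursion depth,
-- which Pre_'s acyclicity keeps ≤ number of keys) totalizes the recursion — on fuel 0
-- (unreachable under Pre_) the dict is returned unchanged.
def pvVisitA (t2s : List (String × List String)) (folks : List String) :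
    Nat → String → PySem.Dict String Bool → PySem.Dict String Bool
  | 0, _, vis => vis
  | fuel+1, team, vis =>
    let mems := (t2s.lookup team).getD []   -- teams_to_supporters[team]; visit is only called on keys
    if mems.length = 0 then
      vis.insert team true
    else
      let r := mems.foldl (fun (acc : Bool × PySem.Dict String Bool) member =>
        match acc.2.get? member with
        | some b => (acc.1 && b, acc.2)
        | none =>
          if (t2s.lookup member).isSome then
            let vis' := pvVisitA t2s folks fuel member acc.2
            (acc.1 && ((vis'.get? member).getD false), vis')
          else
            (acc.1 && folks.contains member, acc.2)) (true, vis)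
      r.2.insert team r.1

def teams_with_full_attendance (teams_to_supporters : List (String × List String)) (folks_available : List String) : List String :=
  (teams_to_supporters.foldl (fun (acc : PySem.Dict String Bool × List String) kv =>
      let vis := pvVisitA teams_to_supporters folks_available (teams_to_supporters.length + 1) kv.1 acc.1
      if (vis.get? kv.1).getD false then (vis, acc.2 ++ [kv.1]) else (vis, acc.2))
    (PySem.Dict.empty, [])).2

-- ===== PORT B =====
-- B's pure recursive 'attends'; same fuel totalization.
def pvAttends (t2s : List (String × List String)) (folks : List String) : Nat → String → Bool
  | 0, _ => false
  | fuel+1, m =>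
    match t2s.lookup m with
    | some mems => mems.all (pvAttends t2s folks fuel)
    | none => folks.contains m

def teams_with_full_attendance_alt (teams_to_supporters : List (String × List String)) (folks_available : List String) : List String :=
  (teams_to_supporters.map Prod.fst).filter
    (pvAttends teams_to_supporters folks_available (teams_to_supporters.length + 1))

-- ===== PRECONDITION & SPEC =====
-- one peeling round: keep exactly the keys that still have a team-member among the remaining keys
def pvPeel (t2s : List (String × List String)) (rem : List String) : List String :=
  rem.filter (fun k => ((t2s.lookup k).getD []).any (fun m => (t2s.lookup m).isSome && rem.contains m))

def pvRem (t2s : List (String × List String)) : Nat → List String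
  | 0 => t2s.map Prod.fst
  | i+1 => pvPeel t2s (pvRem t2s i)

-- Pre_ excludes association lists with duplicate keys (a Python dict cannot contain them, so such
-- lists represent no Python input) and cyclic team graphs (on which A's recursive visit raises
-- RecursionError); acyclicity is stated as: iterated peeling of the key graph empties.
def Pre_teams_with_full_attendance (teams_to_supporters : List (String × List String)) (folks_available : List String) : Prop :=
  (teams_to_supporters.map Prod.fst).Nodup ∧ pvRem teams_to_supporters teams_to_supporters.length = []

instance (teams_to_supporters : List (String × List String)) (folks_available : List String) : Decidable (Pre_teams_with_full_attendance teams_to_supporters folks_available) := by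
  unfold Pre_teams_with_full_attendance; infer_instance

def pvWitness_teams_with_full_attendance : (List (String × List String)) × List String :=
  ([("a", ["x", "b"]), ("b", [])], ["x"])

def Spec_teams_with_full_attendance (teams_to_supporters : List (String × List String)) (folks_available : List String) (out : List String) : Prop := out = teams_with_full_attendance_alt teams_to_supporters folks_available
instance (teams_to_supporters : List (String × List String)) (folks_available : List String) (out : List String) : Decidable (Spec_teams_with_full_attendance teams_to_supporters folks_available out) := by unfold Spec_teams_with_full_attendance; infer_instance

-- ===== CLAIM (what is proved, stated in full; the proofs are below) =====
def Claim_equal_teams_with_full_attendance : Prop := ∀ (teams_to_supporters : List (String × List String)) (folks_available : List String), Dom_teams_with_full_attendance teams_to_supporters folks_available → Pre_teams_with_full_attendance teams_to_supporters folks_available → Spec_teams_with_full_attendance teams_to_supporters folks_available (teams_with_full_attendance teams_to_supporters folks_available)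

-- ===== LEMMAS AND PROOFS =====

-- the denotation both programs compute: B's attends at full fuel
def pvVal (t2s : List (String × List String)) (folks : List String) : String → Bool :=
  pvAttends t2s folks (t2s.length + 1)

-- invariant of A's visited dict: every stored value is the denotation of its key
def pvInv (t2s : List (String × List String)) (folks : List String) (vis : PySem.Dict String Bool) : Prop :=
  ∀ k b, vis.get? k = some b → b = pvVal t2s folks k

theorem pv_all_congr {l : List String} {p q : String → Bool} (h : ∀ x ∈ l, p x = q x) :
    l.all p = l.all q := by
  induction l with
  | nil => rfl
  | cons x xs ih =>
    simp only [List.all_cons]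
    rw [h x (List.mem_cons_self), ih fun y hy => h y (List.mem_cons_of_mem x hy)]

theorem pv_lookup_mem (l : List (String × List String)) (a : String) :
    (l.lookup a).isSome = true ↔ a ∈ l.map Prod.fst := by
  induction l with
  | nil => simp [List.lookup]
  | cons p rest ih =>
    simp only [List.lookup, List.map_cons, List.mem_cons]
    by_cases h : a = p.1
    · simp [h]
    · have hb : (a == p.1) = false := beq_false_of_ne h
      simp only [hb, ih]
      exact ⟨Or.inr, fun hm => hm.elim (fun he => absurd he h) id⟩

theorem pv_removal (t2s : List (String × List String)) (r : Nat) (team : String)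
    (h1 : team ∈ pvRem t2s r) (h2 : team ∉ pvRem t2s (r + 1)) :
    ∀ m ∈ (t2s.lookup team).getD [], (t2s.lookup m).isSome → m ∉ pvRem t2s r := by
  intro m hm hk hmem
  apply h2
  simp only [pvRem, pvPeel, List.mem_filter]
  refine ⟨h1, ?_⟩
  simp only [List.any_eq_true]
  exact ⟨m, hm, by simp [hk, hmem]⟩

theorem pv_first_removal (t2s : List (String × List String)) (team : String) (ρ : Nat)
    (h0 : team ∈ pvRem t2s 0) (h : team ∉ pvRem t2s ρ) :
    ∃ r, r < ρ ∧ team ∈ pvRem t2s r ∧ team ∉ pvRem t2s (r + 1) := by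
  induction ρ with
  | zero => exact absurd h0 h
  | succ ρ ih =>
    by_cases hρ : team ∈ pvRem t2s ρ
    · exact ⟨ρ, Nat.lt_succ_self _, hρ, h⟩
    · obtain ⟨r, hr, ha, hb⟩ := ih hρ
      exact ⟨r, by omega, ha, hb⟩

theorem pv_attends_nonkey (t2s : List (String × List String)) (folks : List String)
    (m : String) (f : Nat) (hf : 1 ≤ f) (h : t2s.lookup m = none) :
    pvAttends t2s folks f m = folks.contains m := by
  obtain ⟨g, rfl⟩ : ∃ g, f = g + 1 := ⟨f - 1, by omega⟩
  simp [pvAttends, h]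

theorem pv_stable (t2s : List (String × List String)) (folks : List String) :
    ∀ (r : Nat) (m : String), (t2s.lookup m).isSome → m ∉ pvRem t2s r →
    ∀ f1 f2, r + 1 ≤ f1 → r + 1 ≤ f2 →
    pvAttends t2s folks f1 m = pvAttends t2s folks f2 m := by
  intro r
  induction r with
  | zero => intro m hk h0 _ _ _ _; exact absurd ((pv_lookup_mem t2s m).mp hk) h0
  | succ r ih =>
    intro m hk hmem f1 f2 hf1 hf2
    by_cases hr : m ∈ pvRem t2s r
    · have hrem := pv_removal t2s r m hr hmem
      obtain ⟨mems, hl⟩ := Option.isSome_iff_exists.mp hk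
      obtain ⟨g1, rfl⟩ : ∃ g, f1 = g + 1 := ⟨f1 - 1, by omega⟩
      obtain ⟨g2, rfl⟩ : ∃ g, f2 = g + 1 := ⟨f2 - 1, by omega⟩
      simp only [pvAttends, hl]
      apply pv_all_congr
      intro x hx
      by_cases hkx : (t2s.lookup x).isSome
      · exact ih x hkx (hrem x (by simp [hl, hx]) hkx) g1 g2 (by omega) (by omega)
      · have hn := Option.not_isSome_iff_eq_none.mp hkx
        rw [pv_attends_nonkey t2s folks x g1 (by omega) hn,
            pv_attends_nonkey t2s folks x g2 (by omega) hn]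
    · exact ih m hk hr f1 f2 (by omega) (by omega)

theorem pv_val_key (t2s : List (String × List String)) (folks : List String)
    (hA : pvRem t2s t2s.length = []) (team : String) (mems : List String)
    (hl : t2s.lookup team = some mems) :
    pvVal t2s folks team = mems.all (pvVal t2s folks) := by
  have hk : (t2s.lookup team).isSome := by simp [hl]
  have h0 : team ∈ pvRem t2s 0 := (pv_lookup_mem t2s team).mp hk
  have hn1 : 1 ≤ t2s.length := by
    rcases t2s with _ | _
    · simp [List.lookup] at hl
    · simp
  have hn : team ∉ pvRem t2s t2s.length := by simp [hA]
  obtain ⟨r, hr, h1, h2⟩ := pv_first_removal t2s team t2s.length h0 hn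
  have hrem := pv_removal t2s r team h1 h2
  show pvAttends t2s folks (t2s.length + 1) team = _
  conv_lhs => rw [pvAttends, hl]
  apply pv_all_congr
  intro x hx
  by_cases hkx : (t2s.lookup x).isSome
  · exact pv_stable t2s folks r x hkx (hrem x (by simp [hl, hx]) hkx)
      t2s.length (t2s.length + 1) (by omega) (by omega)
  · have hnx := Option.not_isSome_iff_eq_none.mp hkx
    rw [pv_attends_nonkey t2s folks x t2s.length (by omega) hnx]
    exact (pv_attends_nonkey t2s folks x (t2s.length + 1) (by omega) hnx).symm

theorem pvInv_insert (t2s : List (String × List String)) (folks : List String)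
    (vis : PySem.Dict String Bool) (h : pvInv t2s folks vis) (k : String) (b : Bool)
    (hv : b = pvVal t2s folks k) : pvInv t2s folks (vis.insert k b) := by
  intro k' b' hb'
  rw [PySem.Dict.get?_insert] at hb'
  split at hb'
  · next he => cases hb'; exact he ▸ hv
  · exact h k' b' hb'

theorem pv_visitA_spec (t2s : List (String × List String)) (folks : List String)
    (hA : pvRem t2s t2s.length = []) :
    ∀ (r : Nat) (team : String), (t2s.lookup team).isSome → team ∉ pvRem t2s r →
    ∀ fuel, r + 1 ≤ fuel → ∀ vis, pvInv t2s folks vis →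
      pvInv t2s folks (pvVisitA t2s folks fuel team vis) ∧
      (pvVisitA t2s folks fuel team vis).get? team = some (pvVal t2s folks team) := by
  intro r
  induction r with
  | zero => intro team hk h0 _ _ _ _; exact absurd ((pv_lookup_mem t2s team).mp hk) h0
  | succ r ih =>
    intro team hk hmem fuel hf vis hInv
    by_cases hr : team ∈ pvRem t2s r
    swap
    · exact ih team hk hr fuel (by omega) vis hInv
    have hrem := pv_removal t2s r team hr hmem
    obtain ⟨mems, hl⟩ := Option.isSome_iff_exists.mp hk
    obtain ⟨f, rfl⟩ : ∃ g, fuel = g + 1 := ⟨fuel - 1, by omega⟩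
    have hval := pv_val_key t2s folks hA team mems hl
    rw [hl] at hrem
    simp only [Option.getD_some] at hrem
    simp only [pvVisitA, hl, Option.getD_some]
    by_cases hm0 : mems.length = 0
    · rw [if_pos hm0]
      have hme : mems = [] := List.length_eq_zero_iff.mp hm0
      have hvt : pvVal t2s folks team = true := by rw [hval, hme]; rfl
      refine ⟨pvInv_insert t2s folks vis hInv team true hvt.symm, ?_⟩
      rw [PySem.Dict.get?_insert, if_pos rfl, hvt]
    · rw [if_neg hm0]
      have inner : ∀ (l : List String), (∀ x ∈ l, (t2s.lookup x).isSome → x ∉ pvRem t2s r) →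
          ∀ (full : Bool) (vis : PySem.Dict String Bool), pvInv t2s folks vis →
          pvInv t2s folks (l.foldl (fun (acc : Bool × PySem.Dict String Bool) member =>
            match acc.2.get? member with
            | some b => (acc.1 && b, acc.2)
            | none =>
              if (t2s.lookup member).isSome then
                let vis' := pvVisitA t2s folks f member acc.2
                (acc.1 && ((vis'.get? member).getD false), vis')
              else
                (acc.1 && folks.contains member, acc.2)) (full, vis)).2 ∧
          (l.foldl (fun (acc : Bool × PySem.Dict String Bool) member =>
            match acc.2.get? member with
            | some b => (acc.1 && b, acc.2)
            | none =>
              if (t2s.lookup member).isSome then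
                let vis' := pvVisitA t2s folks f member acc.2
                (acc.1 && ((vis'.get? member).getD false), vis')
              else
                (acc.1 && folks.contains member, acc.2)) (full, vis)).1
            = (full && l.all (pvVal t2s folks)) := by
        intro l
        induction l with
        | nil => intro _ full vis hI; exact ⟨hI, by simp⟩
        | cons x xs ihl =>
          intro hsub full vis hI
          simp only [List.foldl_cons, List.all_cons]
          cases hx : vis.get? x with
          | some b =>
            have hb := hI x b hx
            obtain ⟨rI, rF⟩ := ihl (fun y hy => hsub y (List.mem_cons_of_mem x hy))
              (full && b) vis hI
            exact ⟨rI, by rw [rF, hb, Bool.and_assoc]⟩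
          | none =>
            by_cases hkx : (t2s.lookup x).isSome
            · rw [if_pos hkx]
              obtain ⟨vI, vG⟩ := ih x hkx (hsub x List.mem_cons_self hkx) f (by omega) vis hI
              obtain ⟨rI, rF⟩ := ihl (fun y hy => hsub y (List.mem_cons_of_mem x hy))
                (full && ((pvVisitA t2s folks f x vis).get? x).getD false)
                (pvVisitA t2s folks f x vis) vI
              exact ⟨rI, by rw [rF, vG, Option.getD_some, Bool.and_assoc]⟩
            · rw [if_neg hkx]
              have hnx := Option.not_isSome_iff_eq_none.mp hkx
              obtain ⟨rI, rF⟩ := ihl (fun y hy => hsub y (List.mem_cons_of_mem x hy))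
                (full && folks.contains x) vis hI
              refine ⟨rI, ?_⟩
              rw [rF, Bool.and_assoc]
              have : pvVal t2s folks x = folks.contains x :=
                pv_attends_nonkey t2s folks x (t2s.length + 1) (by omega) hnx
              rw [this]
      obtain ⟨rI, rF⟩ := inner mems hrem true vis hInv
      rw [rF]
      have hb : (true && mems.all (pvVal t2s folks)) = pvVal t2s folks team := by
        rw [Bool.true_and, ← hval]
      refine ⟨pvInv_insert t2s folks _ rI team _ hb, ?_⟩
      rw [PySem.Dict.get?_insert, if_pos rfl, hb]

theorem pv_top (t2s : List (String × List String)) (folks : List String)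
    (hA : pvRem t2s t2s.length = []) :
    ∀ (l : List (String × List String)), (∀ kv ∈ l, kv ∈ t2s) →
    ∀ (vis : PySem.Dict String Bool) (out : List String), pvInv t2s folks vis →
    (l.foldl (fun (acc : PySem.Dict String Bool × List String) kv =>
        let vis := pvVisitA t2s folks (t2s.length + 1) kv.1 acc.1
        if (vis.get? kv.1).getD false then (vis, acc.2 ++ [kv.1]) else (vis, acc.2))
      (vis, out)).2 = out ++ (l.map Prod.fst).filter (pvVal t2s folks) := by
  intro l
  induction l with
  | nil => intro _ vis out _; simp
  | cons kv rest ihl =>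
    intro hsub vis out hI
    have hk : (t2s.lookup kv.1).isSome := (pv_lookup_mem t2s kv.1).mpr
      (List.mem_map_of_mem (hsub kv List.mem_cons_self))
    have hnm : kv.1 ∉ pvRem t2s t2s.length := by simp [hA]
    obtain ⟨vI, vG⟩ := pv_visitA_spec t2s folks hA t2s.length kv.1 hk hnm
      (t2s.length + 1) (by omega) vis hI
    simp only [List.foldl_cons, List.map_cons, List.filter_cons, vG, Option.getD_some]
    cases hv : pvVal t2s folks kv.1 with
    | true =>
      rw [if_pos rfl]
      rw [ihl (fun y hy => hsub y (List.mem_cons_of_mem kv hy)) _ _ vI]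
      simp
    | false =>
      rw [if_neg (by simp)]
      rw [ihl (fun y hy => hsub y (List.mem_cons_of_mem kv hy)) _ _ vI]
      simp

-- ===== VERDICT (by name: the statement is the Claim_ definition above) =====
theorem teams_with_full_attendance_spec : Claim_equal_teams_with_full_attendance := by
  intro t2s folks _ hPre
  obtain ⟨_, hA⟩ := hPre
  show teams_with_full_attendance t2s folks = teams_with_full_attendance_alt t2s folks
  unfold teams_with_full_attendance teams_with_full_attendance_alt
  rw [pv_top t2s folks hA t2s (fun _ h => h) PySem.Dict.empty [] (fun k b hb => by
    simp [PySem.Dict.get?_empty] at hb)]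
  rfl
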